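-- pv_equiv track=rewrite | github.com/hatixntsoa/maths.occ | core/set/operations.py | is_injective
-- ===== SOURCE A (Python) =====
-- def is_injective(f: dict) -> tuple[bool, str]:
--     """
--     f est injective  ⟺  f(x₁) = f(x₂)  ⟹  x₁ = x₂
--
--     Test algorithmique :
--       Si toutes les valeurs de f sont distinctes → injective.
--       Équivalent à : |f(A)| == |A|
--
--     Explication intuitive :
--       Pas deux éléments différents ne peuvent avoir la même image.
--       Chaque valeur de B est atteinte AU PLUS une fois.
--     """
--     values = list(f.values())
--     unique_values = set(values)
--
--     if len(unique_values) == len(values):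
--         return True, "✅ Injective : aucune collision, chaque f(x) est unique."
--
--     # Trouver les collisions pour expliquer pourquoi
--     seen = {}
--     collisions = []
--     for x, y in f.items():
--         if y in seen:
--             collisions.append(f"f({seen[y]}) = f({x}) = {y}")
--         else:
--             seen[y] = x
--
--     msg = "❌ Non injective — collisions : " + ", ".join(collisions[:3])
--     if len(collisions) > 3:
--         msg += f" (et {len(collisions) - 3} autre(s))"
--     return False, msg
-- ===== SOURCE B (Python) =====
-- def is_injective(f: dict) -> tuple[bool, str]:
--     # Alternative decomposition: no upfront set(values) size check and no 'seen'
--     # hash map -- a single enumerate pass where each item scans the preceding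
--     # prefix for the first earlier item with the same value.
--     items = list(f.items())
--     collisions = []
--     for i, (x, y) in enumerate(items):
--         for xj, yj in items[:i]:
--             if yj == y:
--                 collisions.append(f"f({xj}) = f({x}) = {y}")
--                 break
--     if not collisions:
--         return True, "✅ Injective : aucune collision, chaque f(x) est unique."
--     msg = "❌ Non injective — collisions : " + ", ".join(collisions[:3])
--     if len(collisions) > 3:
--         msg += f" (et {len(collisions) - 3} autre(s))"
--     return False, msg
-- ===== Notes on version B (the rewrite author's own statement) =====
-- stated objective: alternative
-- what changed: Replaces A's two-phase strategy (set-size comparison to decide injectivity, then a hash-map 'seen' pass to collect collisions) by a single prefix-scanning pass with no set and no dict: each item looks back through the earlier items for the first one with the same value; emptiness of the collected collisions decides the verdict.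
import Mathlib
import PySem

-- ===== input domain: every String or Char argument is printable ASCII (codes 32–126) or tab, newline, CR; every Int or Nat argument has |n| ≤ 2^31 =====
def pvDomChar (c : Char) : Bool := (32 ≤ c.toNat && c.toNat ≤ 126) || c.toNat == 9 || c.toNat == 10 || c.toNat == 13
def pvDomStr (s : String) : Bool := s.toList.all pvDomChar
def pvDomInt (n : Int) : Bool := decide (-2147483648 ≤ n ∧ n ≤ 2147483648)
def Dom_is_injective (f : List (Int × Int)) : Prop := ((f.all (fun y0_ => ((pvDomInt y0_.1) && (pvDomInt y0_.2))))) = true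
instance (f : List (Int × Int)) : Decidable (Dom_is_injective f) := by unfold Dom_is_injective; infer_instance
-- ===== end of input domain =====

-- B replaces A's set-size check plus hash-map collision pass by one prefix-scanning pass
-- (alternative decomposition, not claimed faster). The dict argument is the association
-- list of the dict's items in insertion order.

-- ===== PORT A =====
-- the f-string f"f({seen[y]}) = f({x}) = {y}"
def pvEntry (x0 x y : Int) : String :=
  "f(" ++ PySem.Int.toStr x0 ++ ") = f(" ++ PySem.Int.toStr x ++ ") = " ++ PySem.Int.toStr y

-- body of A's 'for x, y in f.items()' loop over the state (seen, collisions)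
def pvStepA (st : PySem.Dict Int Int × List String) (p : Int × Int) :
    PySem.Dict Int Int × List String :=
  match st.1.get? p.2 with
  | some x0 => (st.1, st.2 ++ [pvEntry x0 p.1 p.2])
  | none => (st.1.insert p.2 p.1, st.2)

def is_injective (f : List (Int × Int)) : Bool × String :=
  let values := f.map (fun p => p.2)
  let uniqueValues : PySem.Set Int := PySem.Set.ofList values
  if uniqueValues.length = values.length then
    (true, "✅ Injective : aucune collision, chaque f(x) est unique.")
  else
    let collisions := (f.foldl pvStepA (PySem.Dict.empty, [])).2
    let msg := "❌ Non injective — collisions : " ++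
      PySem.Str.join ", " (PySem.List.slice collisions none (some 3))
    let msg := if 3 < collisions.length then
        msg ++ " (et " ++ PySem.Int.toStr ((collisions.length : Int) - 3) ++ " autre(s))"
      else msg
    (false, msg)

-- ===== PORT B =====
-- Source B's inner loop: first earlier item whose value equals y (break on first hit)
def pvInnerB : List (Int × Int) → Int → Option Int
  | [], _ => none
  | (a, b) :: t, y => if b = y then some a else pvInnerB t y

-- Source B's outer enumerate loop: pre is items[:i], rest the items still to visit
def pvScanB : List (Int × Int) → List (Int × Int) → List String
  | _, [] => []
  | pre, (x, y) :: rest =>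
      (match pvInnerB pre y with
       | some x0 => [pvEntry x0 x y]
       | none => []) ++ pvScanB (pre ++ [(x, y)]) rest

def is_injective_alt (f : List (Int × Int)) : Bool × String :=
  let collisions := pvScanB [] f
  if collisions = [] then
    (true, "✅ Injective : aucune collision, chaque f(x) est unique.")
  else
    let msg := "❌ Non injective — collisions : " ++
      PySem.Str.join ", " (PySem.List.slice collisions none (some 3))
    let msg := if 3 < collisions.length then
        msg ++ " (et " ++ PySem.Int.toStr ((collisions.length : Int) - 3) ++ " autre(s))"
      else msg
    (false, msg)

-- ===== PRECONDITION & SPEC =====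
def Spec_is_injective (f : List (Int × Int)) (out : Bool × String) : Prop := out = is_injective_alt f
instance (f : List (Int × Int)) (out : Bool × String) : Decidable (Spec_is_injective f out) := by unfold Spec_is_injective; infer_instance

-- ===== CLAIM (what is proved, stated in full; the proofs are below) =====
def Claim_equal_is_injective : Prop := ∀ (f : List (Int × Int)), Dom_is_injective f → Spec_is_injective f (is_injective f)

-- ===== LEMMAS AND PROOFS =====

lemma pvInnerB_append (l : List (Int × Int)) (p : Int × Int) (y : Int) :
    pvInnerB (l ++ [p]) y =
      match pvInnerB l y with
      | some a => some a
      | none => if p.2 = y then some p.1 else none := by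
  induction l with
  | nil => simp [pvInnerB]
  | cons q t ih =>
      obtain ⟨a, b⟩ := q
      by_cases h : b = y <;> simp [pvInnerB, h, ih]

-- A's fold with the 'seen' dict produces exactly B's prefix-scan collisions,
-- as long as 'seen' answers exactly like scanning the prefix.
lemma pvFold_eq_scan (f : List (Int × Int)) :
    ∀ (pre : List (Int × Int)) (seen : PySem.Dict Int Int) (acc : List String),
    (∀ y, seen.get? y = pvInnerB pre y) →
    (f.foldl pvStepA (seen, acc)).2 = acc ++ pvScanB pre f := by
  induction f with
  | nil => intro pre seen acc _; simp [pvScanB]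
  | cons p t ih =>
      intro pre seen acc hinv
      obtain ⟨x, y⟩ := p
      rcases h : seen.get? y with _ | x0
      · -- y not seen: insert, no collision
        have : (t.foldl pvStepA (seen.insert y x, acc)).2
            = acc ++ pvScanB (pre ++ [(x, y)]) t := by
          apply ih
          intro y'
          rw [PySem.Dict.get?_insert, pvInnerB_append, ← hinv y']
          by_cases hy : y' = y
          · subst hy; simp [h]
          · rcases h2 : seen.get? y' with _ | a <;> simp [hy, Ne.symm hy]
        simpa [List.foldl_cons, pvStepA, h, pvScanB, hinv y ▸ h, ← hinv y, h] using this
      · -- collision: entry appended, seen unchanged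
        have hb : pvInnerB pre y = some x0 := by rw [← hinv y, h]
        have : (t.foldl pvStepA (seen, acc ++ [pvEntry x0 x y])).2
            = (acc ++ [pvEntry x0 x y]) ++ pvScanB (pre ++ [(x, y)]) t := by
          apply ih
          intro y'
          rw [pvInnerB_append, ← hinv y']
          by_cases hy : y' = y
          · subst hy; simp [hinv y', hb]
          · rcases h2 : seen.get? y' with _ | a <;> simp [Ne.symm hy]
        simp only [List.foldl_cons, pvStepA, h, pvScanB, hb, this]
        simp
  
lemma pvScanB_eq_nil_iff (f : List (Int × Int)) :
    ∀ pre, pvScanB pre f = [] ↔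
      (∀ p ∈ f, pvInnerB pre p.2 = none) ∧ (f.map (fun p => p.2)).Nodup := by
  induction f with
  | nil => intro pre; simp [pvScanB]
  | cons p t ih =>
      intro pre
      obtain ⟨x, y⟩ := p
      have hmem : ∀ q : Int × Int, q ∈ t →
          (pvInnerB (pre ++ [(x, y)]) q.2 = none ↔ pvInnerB pre q.2 = none ∧ q.2 ≠ y) := by
        intro q _
        rw [pvInnerB_append]
        rcases h2 : pvInnerB pre q.2 with _ | a
        · by_cases hy : q.2 = y
          · simp [hy]
          · simp [hy]; omega
        · simp
      rcases h : pvInnerB pre y with _ | x0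
      · simp only [pvScanB, h, List.nil_append, ih (pre ++ [(x, y)]), List.map_cons,
          List.nodup_cons, List.mem_map, List.forall_mem_cons, true_and]
        constructor
        · rintro ⟨hall, hnd⟩
          refine ⟨fun q hq => ((hmem q hq).1 (hall q hq)).1, fun hy => ?_, hnd⟩
          obtain ⟨p', hp', hpy⟩ := hy
          exact ((hmem p' hp').1 (hall p' hp')).2 hpy
        · rintro ⟨hall, hyn, hnd⟩
          exact ⟨fun q hq => (hmem q hq).2 ⟨hall q hq, fun hqy => hyn ⟨q, hq, hqy⟩⟩, hnd⟩
      · simp [pvScanB, h]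
  
-- |set(values)| = |values| iff the values are pairwise distinct
lemma pvSetLen_iff (xs : List Int) :
    (PySem.Set.ofList xs).length = xs.length ↔ xs.Nodup := by
  induction xs using List.reverseRecOn with
  | nil => simp [PySem.Set.ofList]
  | append_singleton t x ih =>
      rw [PySem.Set.ofList_append_singleton]
      have hnd_iff : (t ++ [x]).Nodup ↔ x ∉ t ∧ t.Nodup := by
        rw [(List.perm_append_singleton x t).nodup_iff, List.nodup_cons]
      by_cases hx : x ∈ t
      · have hle := PySem.Set.length_ofList_le (xs := t)
        have hadd : PySem.Set.add (PySem.Set.ofList t) x = PySem.Set.ofList t := by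
          simp [PySem.Set.add]; exact hx
        rw [hadd, hnd_iff]
        simp only [List.length_append, List.length_singleton]
        constructor
        · intro h; omega
        · rintro ⟨hxn, -⟩; exact absurd hx hxn
      · have hadd : PySem.Set.add (PySem.Set.ofList t) x = PySem.Set.ofList t ++ [x] := by
          simp [PySem.Set.add]; exact hx
        rw [hadd, hnd_iff]
        simp only [List.length_append, List.length_singleton]
        constructor
        · intro h; exact ⟨hx, ih.1 (by omega)⟩
        · rintro ⟨-, hnd⟩; rw [ih.2 hnd]

lemma pv_collisions_eq (f : List (Int × Int)) :
    (f.foldl pvStepA (PySem.Dict.empty, [])).2 = pvScanB [] f := by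
  have := pvFold_eq_scan f [] PySem.Dict.empty []
    (by intro y; simp [PySem.Dict.get?_empty, pvInnerB])
  simpa using this

-- ===== VERDICT (by name: the statement is the Claim_ definition above) =====
theorem is_injective_spec : Claim_equal_is_injective := by
  intro f _
  show is_injective f = is_injective_alt f
  by_cases hn : (f.map (fun p => p.2)).Nodup
  · have hA : (PySem.Set.ofList (f.map (fun p => p.2))).length = (f.map (fun p => p.2)).length :=
      (pvSetLen_iff _).2 hn
    have hB : pvScanB [] f = [] :=
      (pvScanB_eq_nil_iff f []).2 ⟨fun p _ => rfl, hn⟩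
    simp [is_injective, is_injective_alt, hA, hB]
  · have hA : ¬ (PySem.Set.ofList (f.map (fun p => p.2))).length = f.length := by
      intro h
      exact hn ((pvSetLen_iff _).1 (by simpa using h))
    have hB : ¬ pvScanB [] f = [] := by
      intro h
      exact hn ((pvScanB_eq_nil_iff f []).1 h).2
    simp [is_injective, is_injective_alt, hA, hB, pv_collisions_eq]
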